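-- pv_equiv track=rewrite | github.com/Aryudesu/ABC | ABC/400_499/416/B.py | calc
-- ===== SOURCE A (Python) =====
-- def calc(S):
--     result = ""
--     putF = False
--     for s in S:
--         if s == "#":
--             putF = False
--             result += "#"
--         elif s == ".":
--             if not putF:
--                 result += "o"
--                 putF = True
--             else:
--                 result += "."
--     return result
-- ===== SOURCE B (Python) =====
-- def calc(S):
--     filtered = ''.join(c for c in S if c in '#.')
--     return '#'.join('o' + '.' * (len(seg) - 1) if seg else ''
--                     for seg in filtered.split('#'))
-- ===== Notes on version B (the rewrite author's own statement) =====
-- stated objective: simpler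
-- what changed: Replaces A's char-by-char stateful flag loop with staged passes: filter to the two significant characters, split the result on the hash separator into maximal dot-runs, rewrite each nonempty run so its first dot becomes the marker, and rejoin with the separator.
import Mathlib
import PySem

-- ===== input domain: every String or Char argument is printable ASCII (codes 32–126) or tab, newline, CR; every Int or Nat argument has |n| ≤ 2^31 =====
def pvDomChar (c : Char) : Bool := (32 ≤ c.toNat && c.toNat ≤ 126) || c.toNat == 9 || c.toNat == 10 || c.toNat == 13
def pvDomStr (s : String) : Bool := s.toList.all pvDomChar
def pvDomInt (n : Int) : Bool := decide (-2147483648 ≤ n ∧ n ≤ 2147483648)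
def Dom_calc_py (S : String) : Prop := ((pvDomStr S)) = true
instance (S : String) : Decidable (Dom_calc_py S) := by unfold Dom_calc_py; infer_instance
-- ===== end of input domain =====

-- B replaces A's stateful flag loop with staged passes: filter, split on the hash separator, rewrite each dot-run, rejoin (simpler).

-- ===== PORT A =====
-- A's stateful loop: result built char by char with a putF flag; result kept as List Char (String += is '++ [c]').
def calcA_step (st : List Char × Bool) (s : Char) : List Char × Bool :=
  if s == '#' then (st.1 ++ ['#'], false)
  else if s == '.' then
    if !st.2 then (st.1 ++ ['o'], true) else (st.1 ++ ['.'], true)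
  else st

def calc_py (S : String) : String :=
  String.mk (S.toList.foldl calcA_step ([], false)).1

-- ===== PORT B =====
-- hand port of Python's str.split('#') on a list of chars (''.split('#') = ['']), exact
def pvSplitHash : List Char → List (List Char)
  | [] => [[]]
  | c :: t =>
    let r := pvSplitHash t
    if c == '#' then [] :: r else (c :: r.headI) :: r.tail

-- 'o' + '.'*(len(seg)-1) if seg else ''
def pvSeg (seg : List Char) : List Char :=
  if seg.isEmpty then [] else 'o' :: List.replicate (seg.length - 1) '.'

def calc_py_alt (S : String) : String :=
  let filtered := S.toList.filter (fun c => c == '#' || c == '.')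
  String.mk (List.intercalate ['#'] ((pvSplitHash filtered).map pvSeg))

-- ===== PRECONDITION & SPEC =====
def Spec_calc_py (S : String) (out : String) : Prop := out = calc_py_alt S
instance (S : String) (out : String) : Decidable (Spec_calc_py S out) := by unfold Spec_calc_py; infer_instance

-- ===== CLAIM (what is proved, stated in full; the proofs are below) =====
def Claim_equal_calc_py : Prop := ∀ (S : String), Dom_calc_py S → Spec_calc_py S (calc_py S)

-- ===== LEMMAS AND PROOFS =====
-- A's output, written as a structural recursion (proof-side characterisation of the fold)
def outA : List Char → Bool → List Char
  | [], _ => []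
  | c :: t, putF =>
    if c = '#' then '#' :: outA t false
    else if c = '.' then (if putF then '.' else 'o') :: outA t true
    else outA t putF

theorem foldl_eq_outA (l : List Char) (acc : List Char) (putF : Bool) :
    (l.foldl calcA_step (acc, putF)).1 = acc ++ outA l putF := by
  induction l generalizing acc putF with
  | nil => simp [outA]
  | cons c t ih =>
    by_cases h1 : c = '#'
    · subst h1; simp [calcA_step, outA, ih]
    · by_cases h2 : c = '.'
      · subst h2
        cases putF <;> simp [calcA_step, h1, outA, ih]
      · simp [calcA_step, h1, h2, outA, ih]

theorem splitHash_ne_nil (l : List Char) : pvSplitHash l ≠ [] := by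
  cases l with
  | nil => simp [pvSplitHash]
  | cons c t => simp only [pvSplitHash]; split <;> simp

theorem mem_headI_splitHash (l : List Char) (c : Char)
    (h : c ∈ (pvSplitHash l).headI) : c ∈ l ∧ c ≠ '#' := by
  induction l with
  | nil => simp [pvSplitHash] at h
  | cons d t ih =>
    by_cases hd : d = '#'
    · subst hd; simp [pvSplitHash] at h
    · simp only [pvSplitHash, beq_iff_eq, hd, if_neg, List.headI_cons] at h
      rcases List.mem_cons.mp h with h | h
      · subst h; exact ⟨List.mem_cons_self, hd⟩
      · exact ⟨List.mem_cons_of_mem _ (ih h).1, (ih h).2⟩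

-- the head segment of the split of the filtered list consists of dots only
theorem headI_replicate (l : List Char) :
    (pvSplitHash (l.filter (fun c => c == '#' || c == '.'))).headI =
      List.replicate (pvSplitHash (l.filter (fun c => c == '#' || c == '.'))).headI.length '.' := by
  apply List.eq_replicate_of_mem
  intro b hb
  obtain ⟨hmem, hne⟩ := mem_headI_splitHash _ _ hb
  have := List.of_mem_filter hmem
  simp only [Bool.or_eq_true, beq_iff_eq] at this
  tauto

theorem outA_split (l : List Char) (putF : Bool) :
    outA l putF =
      (if putF then (pvSplitHash (l.filter (fun c => c == '#' || c == '.'))).headI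
       else pvSeg (pvSplitHash (l.filter (fun c => c == '#' || c == '.'))).headI) ++
        (pvSplitHash (l.filter (fun c => c == '#' || c == '.'))).tail.flatMap
          (fun seg => '#' :: pvSeg seg) := by
  induction l generalizing putF with
  | nil => cases putF <;> simp [outA, pvSplitHash, pvSeg]
  | cons c t ih =>
    by_cases h1 : c = '#'
    · subst h1
      have hne := splitHash_ne_nil (t.filter (fun c => c == '#' || c == '.'))
      simp only [outA, if_pos rfl, List.filter_cons,
        show (('#' == '#' || '#' == '.') = true) by decide, if_true]
      rw [ih false]
      cases hs : pvSplitHash (t.filter (fun c => c == '#' || c == '.')) with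
      | nil => exact absurd hs hne
      | cons s0 rest =>
        simp [pvSplitHash, hs, pvSeg, List.flatMap_cons]
    · by_cases h2 : c = '.'
      · subst h2
        have hd := headI_replicate t
        cases putF
        · simp only [outA, List.filter_cons, if_neg (by decide : ¬('.' = '#')),
            show (('.' == '#' || '.' == '.') = true) by decide, if_true,
            Bool.false_eq_true, if_false]
          rw [ih true]
          simp only [pvSplitHash, show (('.' == '#') = false) by decide, Bool.false_eq_true,
            if_false, List.headI_cons, List.tail_cons, pvSeg, List.isEmpty_cons,
            List.length_cons, Nat.add_sub_cancel, if_true]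
          rw [hd]
          simp
        · simp only [outA, List.filter_cons, if_neg (by decide : ¬('.' = '#')),
            show (('.' == '#' || '.' == '.') = true) by decide, if_true]
          rw [ih true]
          simp [pvSplitHash]
      · simp only [outA, if_neg h1, if_neg h2]
        rw [ih putF]
        simp [List.filter_cons, h1, h2]

theorem intercalate_eq_flatMap (s0 : List Char) (rest : List (List Char)) :
    List.intercalate ['#'] (pvSeg s0 :: List.map pvSeg rest) =
      pvSeg s0 ++ rest.flatMap (fun seg => '#' :: pvSeg seg) := by
  induction rest generalizing s0 with
  | nil => simp [List.intercalate]
  | cons a rs ih =>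
    have h : List.intercalate ['#'] (pvSeg s0 :: pvSeg a :: List.map pvSeg rs) =
        pvSeg s0 ++ ['#'] ++ List.intercalate ['#'] (pvSeg a :: List.map pvSeg rs) := by
      simp [List.intercalate]
    rw [List.map_cons, h, ih a]
    simp [List.flatMap_cons]

-- ===== VERDICT (by name: the statement is the Claim_ definition above) =====
theorem calc_py_spec : Claim_equal_calc_py := by
  intro S _
  unfold Spec_calc_py calc_py calc_py_alt
  rw [foldl_eq_outA, outA_split]
  have hne := splitHash_ne_nil (S.toList.filter (fun c => c == '#' || c == '.'))
  cases hs : pvSplitHash (S.toList.filter (fun c => c == '#' || c == '.')) with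
  | nil => exact absurd hs hne
  | cons s0 rest =>
    simp [hs, intercalate_eq_flatMap]
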